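-- pv_equiv track=rewrite | github.com/cibelerdgs/Analise-de-dados-e-banco | main.py | projetos_por_area_AP
-- ===== SOURCE A (Python) =====
-- def projetos_por_area_AP(dados):
--     resultado = {}
--     for p in dados:
--         if p['campus'] == 'AP':
--             area = p['area_conhecimento']
--             if area in resultado.keys():
--                 resultado[area] += 1
--             else:
--                 resultado[area] = 1
--     return resultado
-- ===== SOURCE B (Python) =====
-- def projetos_por_area_AP(dados):
--     areas = [p['area_conhecimento'] for p in dados if p['campus'] == 'AP']
--     return {a: areas.count(a) for a in dict.fromkeys(areas)}
-- ===== Notes on version B (the rewrite author's own statement) =====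
-- stated objective: alternative
-- what changed: B first collects the area values of campus-AP projects with a comprehension and then builds the result in one dict comprehension over the first-occurrence-ordered distinct areas using list.count, instead of A's single-pass incremental dict accumulation.
import Mathlib
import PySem

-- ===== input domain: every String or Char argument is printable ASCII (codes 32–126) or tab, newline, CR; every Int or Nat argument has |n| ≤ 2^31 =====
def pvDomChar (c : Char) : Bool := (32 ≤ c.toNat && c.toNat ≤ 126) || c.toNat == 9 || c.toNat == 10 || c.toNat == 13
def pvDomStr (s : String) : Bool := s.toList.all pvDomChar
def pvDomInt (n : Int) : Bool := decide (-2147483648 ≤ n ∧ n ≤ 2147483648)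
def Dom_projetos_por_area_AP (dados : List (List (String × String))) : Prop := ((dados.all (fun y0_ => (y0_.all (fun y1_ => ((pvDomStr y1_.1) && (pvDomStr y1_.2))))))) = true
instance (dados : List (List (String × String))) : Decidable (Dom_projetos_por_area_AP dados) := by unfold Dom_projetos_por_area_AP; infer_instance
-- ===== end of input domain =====

-- B replaces A's single-pass dict accumulation by a collect-then-count pass; equal return value on Pre_.

-- ===== PORT A =====
-- A: one pass, incrementing a counter dict keyed by area for campus-AP projects.
def projetos_por_area_AP (dados : List (List (String × String))) : List (String × Int) :=
  (dados.foldl (fun res p =>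
      match (PySem.Dict.mk p).get? "campus" with
      | some c =>
        if c == "AP" then
          match (PySem.Dict.mk p).get? "area_conhecimento" with
          | some area =>
            if PySem.Dict.contains res area then
              PySem.Dict.insert res area (PySem.Dict.getD res area 0 + 1)
            else
              PySem.Dict.insert res area 1
          | none => res   -- Python raises KeyError here; excluded by Pre_
        else res
      | none => res       -- Python raises KeyError here; excluded by Pre_
    ) PySem.Dict.empty).items

-- ===== PORT B =====
-- areas = [p['area_conhecimento'] for p in dados if p['campus'] == 'AP']
def apAreas (dados : List (List (String × String))) : List String :=
  (dados.filter (fun p => (PySem.Dict.mk p).get? "campus" == some "AP")).map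
    (fun p => ((PySem.Dict.mk p).get? "area_conhecimento").getD "")  -- getD "": KeyError case excluded by Pre_

-- {a: areas.count(a) for a in dict.fromkeys(areas)}
def projetos_por_area_AP_alt (dados : List (List (String × String))) : List (String × Int) :=
  let areas := apAreas dados
  (PySem.List.dedup areas).map (fun a => (a, (areas.count a : Int)))

-- ===== PRECONDITION & SPEC =====
-- Pre_ excludes exactly the inputs on which Python A raises KeyError: a project without a
-- 'campus' key, or a campus-'AP' project without an 'area_conhecimento' key.
def Pre_projetos_por_area_AP (dados : List (List (String × String))) : Prop :=
  ∀ p ∈ dados, (PySem.Dict.mk p).contains "campus" = true ∧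
    ((PySem.Dict.mk p).get? "campus" = some "AP" → (PySem.Dict.mk p).contains "area_conhecimento" = true)
instance (dados : List (List (String × String))) : Decidable (Pre_projetos_por_area_AP dados) := by
  unfold Pre_projetos_por_area_AP; infer_instance

def pvWitness_projetos_por_area_AP : (List (List (String × String))) :=
  [[("campus", "AP"), ("area_conhecimento", "Exatas")], [("campus", "RJ")]]

def Spec_projetos_por_area_AP (dados : List (List (String × String))) (out : List (String × Int)) : Prop := out = projetos_por_area_AP_alt dados
instance (dados : List (List (String × String))) (out : List (String × Int)) : Decidable (Spec_projetos_por_area_AP dados out) := by unfold Spec_projetos_por_area_AP; infer_instance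

-- ===== CLAIM (what is proved, stated in full; the proofs are below) =====
def Claim_equal_projetos_por_area_AP : Prop := ∀ (dados : List (List (String × String))), Dom_projetos_por_area_AP dados → Pre_projetos_por_area_AP dados → Spec_projetos_por_area_AP dados (projetos_por_area_AP dados)

-- ===== LEMMAS AND PROOFS =====

-- A's branch on `area in resultado` is exactly "increment with default 0".
lemma stepA_eq (res : PySem.Dict String Int) (a : String) :
    (if PySem.Dict.contains res a then
        PySem.Dict.insert res a (PySem.Dict.getD res a 0 + 1)
      else PySem.Dict.insert res a 1)
    = PySem.Dict.insert res a (PySem.Dict.getD res a 0 + 1) := by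
  by_cases h : PySem.Dict.contains res a
  · simp [h]
  · simp only [Bool.not_eq_true] at h
    simp [h, PySem.Dict.getD_of_not_contains res 0 h]

-- Under Pre_, A's loop over the projects is the counting loop over the AP areas list.
lemma foldA_eq (dados : List (List (String × String))) (h : Pre_projetos_por_area_AP dados)
    (d : PySem.Dict String Int) :
    dados.foldl (fun res p =>
      match (PySem.Dict.mk p).get? "campus" with
      | some c =>
        if c == "AP" then
          match (PySem.Dict.mk p).get? "area_conhecimento" with
          | some area =>
            if PySem.Dict.contains res area then
              PySem.Dict.insert res area (PySem.Dict.getD res area 0 + 1)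
            else PySem.Dict.insert res area 1
          | none => res
        else res
      | none => res) d
    = (apAreas dados).foldl (fun res a => PySem.Dict.insert res a (PySem.Dict.getD res a 0 + 1)) d := by
  induction dados generalizing d with
  | nil => simp [apAreas]
  | cons p rest ih =>
    obtain ⟨hc, ha⟩ := h p (List.mem_cons_self ..)
    have hrest : Pre_projetos_por_area_AP rest := fun q hq => h q (List.mem_cons_of_mem _ hq)
    rw [PySem.Dict.contains_eq_isSome_get?] at hc
    obtain ⟨c, hcv⟩ := Option.isSome_iff_exists.mp hc
    by_cases hAP : c = "AP"
    · subst hAP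
      have harea := ha hcv
      rw [PySem.Dict.contains_eq_isSome_get?] at harea
      obtain ⟨area, hav⟩ := Option.isSome_iff_exists.mp harea
      simp only [List.foldl_cons, hcv, hav, apAreas, List.filter_cons, List.map_cons,
        beq_self_eq_true, if_true, Option.getD_some]
      rw [stepA_eq]
      exact ih hrest _
    · have hne : (c == "AP") = false := by simp [hAP]
      have hne' : (some c == some "AP") = false := by simp [hAP]
      simp only [List.foldl_cons, hcv, hne, hne', Bool.false_eq_true, if_false,
        apAreas, List.filter_cons]
      exact ih hrest _

-- ===== VERDICT (by name: the statement is the Claim_ definition above) =====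
theorem projetos_por_area_AP_spec : Claim_equal_projetos_por_area_AP := by
  intro dados _ hpre
  unfold Spec_projetos_por_area_AP projetos_por_area_AP projetos_por_area_AP_alt
  rw [foldA_eq dados hpre]
  rw [PySem.Dict.foldl_insert_getD_add_one_eq_counter]
  rw [PySem.Dict.items_counter]
  simp [PySem.List.dedup_eq_ofList]
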